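-- pv_equiv track=rewrite | github.com/komi-assimpah/dev-cps | mqtt-kafka-bridge/utils/cleaner.py | recur_rmv_none_values
-- ===== SOURCE A (Python) =====
-- def recur_rmv_none_values(histo):
--   if len(histo) == 1: return (histo[0], histo)
--   else:
--     if histo[0] != None:
--       return (histo[0], [histo[0]] + recur_rmv_none_values(histo[1:])[1])
--     else:
--       n,m = recur_rmv_none_values(histo[1:])
--       return (n, [n] + m)
-- ===== SOURCE B (Python) =====
-- def recur_rmv_none_values(histo):
--     nxt = None
--     out = []
--     for x in reversed(histo):
--         if x is not None:
--             nxt = x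
--         out.append(nxt)
--     out.reverse()
--     return (out[0], out)
-- ===== Notes on version B (the rewrite author's own statement) =====
-- stated objective: faster
-- what changed: Replaced the recursion that re-slices the list and prepends at every level (quadratic list copying) by one backward linear pass that tracks the next non-None value and fills each slot.
import Mathlib
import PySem

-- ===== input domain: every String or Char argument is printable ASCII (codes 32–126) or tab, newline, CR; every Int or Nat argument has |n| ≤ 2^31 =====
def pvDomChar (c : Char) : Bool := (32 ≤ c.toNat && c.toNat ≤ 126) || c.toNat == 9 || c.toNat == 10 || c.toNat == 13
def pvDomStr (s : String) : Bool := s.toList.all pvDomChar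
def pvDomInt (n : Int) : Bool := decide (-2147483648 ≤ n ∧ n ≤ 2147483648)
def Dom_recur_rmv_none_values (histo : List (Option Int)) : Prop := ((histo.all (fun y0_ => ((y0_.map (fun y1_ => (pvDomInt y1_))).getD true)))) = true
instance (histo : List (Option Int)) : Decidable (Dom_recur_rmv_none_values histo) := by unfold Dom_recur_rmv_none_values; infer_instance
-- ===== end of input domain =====

-- B replaces A's slice-and-prepend recursion by one backward linear pass tracking the next non-None value (asymptotically faster).


-- ===== PORT A =====
-- Literal port of A's recursion: base case len == 1, otherwise branch on whether
-- the head is None, recurse on the tail (histo[1:]) and prepend.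
def recur_rmv_none_values : List (Option Int) → Option Int × List (Option Int)
  | [] => (none, [])          -- Python raises IndexError here; excluded by Pre_
  | [x] => (x, [x])           -- len(histo) == 1
  | x :: y :: rest =>
    match x with
    | some v => (some v, some v :: (recur_rmv_none_values (y :: rest)).2)
    | none =>
      let nm := recur_rmv_none_values (y :: rest)
      (nm.1, nm.1 :: nm.2)

-- ===== PORT B =====
-- One backward pass: fold over the reversed list, carrying the next non-None
-- value; append the fill value each step, then reverse the accumulator.
def pvAltStep (acc : Option Int × List (Option Int)) (x : Option Int) : Option Int × List (Option Int) :=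
  let nxt := if x.isSome then x else acc.1
  (nxt, acc.2 ++ [nxt])

def recur_rmv_none_values_alt (histo : List (Option Int)) : Option Int × List (Option Int) :=
  let s := histo.reverse.foldl pvAltStep (none, [])
  let out := s.2.reverse
  match out with
  | [] => (none, [])          -- Python raises IndexError (out[0]) here; excluded by Pre_
  | y :: _ => (y, out)

-- ===== PRECONDITION & SPEC =====
-- A (and B) raise IndexError on the empty list; nothing else is excluded.
def Pre_recur_rmv_none_values (histo : List (Option Int)) : Prop := histo ≠ []
instance (histo : List (Option Int)) : Decidable (Pre_recur_rmv_none_values histo) := by unfold Pre_recur_rmv_none_values; infer_instance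
def pvWitness_recur_rmv_none_values : List (Option Int) := [some 1, none, some 2, none]

def Spec_recur_rmv_none_values (histo : List (Option Int)) (out : Option Int × List (Option Int)) : Prop := out = recur_rmv_none_values_alt histo
instance (histo : List (Option Int)) (out : Option Int × List (Option Int)) : Decidable (Spec_recur_rmv_none_values histo out) := by unfold Spec_recur_rmv_none_values; infer_instance

-- ===== CLAIM (what is proved, stated in full; the proofs are below) =====
def Claim_equal_recur_rmv_none_values : Prop := ∀ (histo : List (Option Int)), Dom_recur_rmv_none_values histo → Pre_recur_rmv_none_values histo → Spec_recur_rmv_none_values histo (recur_rmv_none_values histo)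

-- ===== LEMMAS AND PROOFS =====

-- A's result list starts with A's first component.
theorem pvA_shape : ∀ (l : List (Option Int)), l ≠ [] →
    ∃ t, (recur_rmv_none_values l).2 = (recur_rmv_none_values l).1 :: t := by
  intro l
  induction l with
  | nil => intro h; exact absurd rfl h
  | cons x rest ih =>
    intro _
    cases rest with
    | nil => exact ⟨[], rfl⟩
    | cons y r =>
      cases x with
      | some v => exact ⟨_, rfl⟩
      | none => exact ⟨_, rfl⟩

-- The backward fold computes A's first component and A's list reversed.
theorem pvFold_eq : ∀ (l : List (Option Int)), l ≠ [] →
    List.foldl pvAltStep (none, []) l.reverse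
      = ((recur_rmv_none_values l).1, (recur_rmv_none_values l).2.reverse) := by
  intro l
  induction l with
  | nil => intro h; exact absurd rfl h
  | cons x rest ih =>
    intro _
    rw [List.reverse_cons, List.foldl_append]
    cases rest with
    | nil =>
      simp [pvAltStep, recur_rmv_none_values]
      cases x <;> simp
    | cons y r =>
      rw [ih (by simp)]
      cases x with
      | some v => simp [pvAltStep, recur_rmv_none_values]
      | none => simp [pvAltStep, recur_rmv_none_values]

-- ===== VERDICT (by name: the statement is the Claim_ definition above) =====
theorem recur_rmv_none_values_spec : Claim_equal_recur_rmv_none_values := by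
  intro histo _ hpre
  unfold Spec_recur_rmv_none_values recur_rmv_none_values_alt
  rw [pvFold_eq histo hpre]
  obtain ⟨t, ht⟩ := pvA_shape histo hpre
  simp [ht]
  exact Prod.ext rfl ht
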